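-- pv_equiv track=rewrite | github.com/DataDog/dd-license-attribution | src/dd_license_attribution/metadata_collector/strategies/github_sbom_collection_strategy.py | __handle_transitive
-- ===== SOURCE A (Python) =====
-- def __handle_transitive(
--
--     packages_in_sbom: list[dict],
--     depsToExclude: list[str],
--     relationships: list[dict],
-- ) -> list[dict]:
--     # Build maps for graph traversal using SPDX IDs
--     name_to_spdxids: dict[str, list[str]] = {}
--     for pkg in packages_in_sbom:
--         name = pkg.get("name")
--         spdx_id = pkg.get("SPDXID")
--         if not name or not spdx_id:
--             continue
--         name_to_spdxids.setdefault(name, []).append(spdx_id)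
--
--     # Build adjacency from relationships (subject DEPENDS_ON object)
--     adjacency: dict[str, set[str]] = {}
--     for rel in relationships or []:
--         if rel.get("relationshipType") != "DEPENDS_ON":
--             continue
--         src = rel.get("spdxElementId")
--         dst = rel.get("relatedSpdxElement")
--         if not src or not dst:
--             continue
--         adjacency.setdefault(src, set()).add(dst)
--
--     # Compute transitive closure of excluded SPDX IDs
--     excluded_spdx_ids: set[str] = set()
--     queue: list[str] = []
--     for dep_name in depsToExclude:
--         for sid in name_to_spdxids.get(dep_name, []):
--             if sid not in excluded_spdx_ids:
--                 excluded_spdx_ids.add(sid)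
--                 queue.append(sid)
--
--     while queue:
--         current = queue.pop(0)
--         for neighbor in adjacency.get(current, set()):
--             if neighbor not in excluded_spdx_ids:
--                 excluded_spdx_ids.add(neighbor)
--                 queue.append(neighbor)
--
--     # Filter out any package whose SPDXID is in the excluded set
--     filtered_packages = [
--         pkg
--         for pkg in packages_in_sbom
--         if pkg.get("SPDXID") not in excluded_spdx_ids
--         and pkg.get("name") not in depsToExclude
--     ]
--
--     return filtered_packages
-- ===== SOURCE B (Python) =====
-- def __handle_transitive(
--     packages_in_sbom: list[dict],
--     depsToExclude: list[str],
--     relationships: list[dict],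
-- ) -> list[dict]:
--     # Collect the DEPENDS_ON edges as plain (src, dst) pairs.
--     edges = [
--         (rel.get("spdxElementId"), rel.get("relatedSpdxElement"))
--         for rel in relationships or []
--         if rel.get("relationshipType") == "DEPENDS_ON"
--         and rel.get("spdxElementId")
--         and rel.get("relatedSpdxElement")
--     ]
--     # Seed the excluded set directly from packages whose name is excluded.
--     excluded = {
--         pkg.get("SPDXID")
--         for pkg in packages_in_sbom
--         if pkg.get("name") and pkg.get("SPDXID")
--         and pkg.get("name") in depsToExclude
--     }
--     # Round-based closure: len(edges) synchronous rounds always reach the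
--     # fixpoint (each productive round covers at least one of the at most
--     # len(edges) edge targets), so no worklist or change flag is needed.
--     for _ in range(len(edges)):
--         excluded |= {dst for src, dst in edges if src in excluded}
--     return [
--         pkg
--         for pkg in packages_in_sbom
--         if pkg.get("SPDXID") not in excluded
--         and pkg.get("name") not in depsToExclude
--     ]
-- ===== Notes on version B (the rewrite author's own statement) =====
-- stated objective: alternative
-- what changed: B drops A's name->SPDXID map, adjacency dict and BFS worklist: it extracts the DEPENDS_ON edge pairs once, seeds the excluded set with one comprehension over the packages, and closes it with exactly len(edges) synchronous rounds (each round adds all one-step successors at once), which provably reaches the same transitive closure.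
import Mathlib
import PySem

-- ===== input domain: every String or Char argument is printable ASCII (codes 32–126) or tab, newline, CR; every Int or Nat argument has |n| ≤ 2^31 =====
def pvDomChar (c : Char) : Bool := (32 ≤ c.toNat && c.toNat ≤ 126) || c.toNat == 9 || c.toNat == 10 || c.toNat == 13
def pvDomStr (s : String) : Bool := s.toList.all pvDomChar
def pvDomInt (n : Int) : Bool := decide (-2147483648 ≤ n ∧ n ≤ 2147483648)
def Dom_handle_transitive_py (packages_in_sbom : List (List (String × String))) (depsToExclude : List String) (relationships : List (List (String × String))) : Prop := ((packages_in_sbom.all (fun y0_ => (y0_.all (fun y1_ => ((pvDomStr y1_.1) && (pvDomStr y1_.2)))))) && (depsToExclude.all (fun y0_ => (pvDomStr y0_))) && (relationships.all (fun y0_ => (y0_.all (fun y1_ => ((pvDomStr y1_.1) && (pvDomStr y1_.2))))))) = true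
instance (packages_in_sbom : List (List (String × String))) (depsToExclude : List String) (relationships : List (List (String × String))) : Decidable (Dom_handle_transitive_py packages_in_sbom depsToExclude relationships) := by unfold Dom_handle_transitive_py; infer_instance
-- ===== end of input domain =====

-- B replaces A's name→ids map, adjacency dict and BFS worklist by an edge list, a
-- seed comprehension and len(edges) synchronous closure rounds (objective: alternative).

-- ===== PORT A =====
-- dict.get(k) on an association list (first match)
def pvGet (d : List (String × String)) (k : String) : Option String :=
  d.lookup k

-- 'opt not in xs' for the final filter ('None in xs' is False for string xs)
def pvIn (o : Option String) (xs : List String) : Bool :=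
  match o with
  | some v => xs.contains v
  | none => false

-- name_to_spdxids.setdefault(name, []).append(spdx_id), skipping falsy name/id
def pvNameStep (d : PySem.Dict String (List String)) (pkg : List (String × String)) : PySem.Dict String (List String) :=
  match pvGet pkg "name", pvGet pkg "SPDXID" with
  | some nm, some sid => if nm = "" ∨ sid = "" then d else d.modify nm [] (fun l => l ++ [sid])
  | _, _ => d

-- adjacency.setdefault(src, set()).add(dst) for DEPENDS_ON with truthy ends
def pvAdjStep (d : PySem.Dict String (PySem.Set String)) (rel : List (String × String)) : PySem.Dict String (PySem.Set String) :=
  if pvGet rel "relationshipType" ≠ some "DEPENDS_ON" then d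
  else
    match pvGet rel "spdxElementId", pvGet rel "relatedSpdxElement" with
    | some src, some dst =>
        if src = "" ∨ dst = "" then d
        else d.modify src PySem.Set.empty (fun s => PySem.Set.add s dst)
    | _, _ => d

-- 'for n in ns: if n not in excluded: excluded.add(n); queue.append(n)'
def pvPush (st : PySem.Set String × List String) (ns : List String) : PySem.Set String × List String :=
  ns.foldl (fun st n => if !(PySem.Set.contains st.1 n) then (PySem.Set.add st.1 n, st.2 ++ [n]) else st) st

def pvUncovered (U : List String) (ex : PySem.Set String) : Nat :=
  (U.filter (fun x => !(PySem.Set.contains ex x))).length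

def pvUniv (adj : PySem.Dict String (PySem.Set String)) : List String :=
  PySem.Set.ofList (PySem.Dict.values adj).flatten

-- termination helpers for the worklist loop (used by pvBfs's decreasing_by)
theorem pvContains_add (ex : PySem.Set String) (n x : String) :
    PySem.Set.contains (PySem.Set.add ex n) x = (PySem.Set.contains ex x || x == n) := by
  rw [Bool.eq_iff_iff]
  simp [PySem.Set.mem_add, beq_iff_eq]

theorem pvUncovered_add_lt (U : List String) (ex : PySem.Set String) (n : String)
    (hn : n ∈ U) (hx : PySem.Set.contains ex n = false) :
    pvUncovered U (PySem.Set.add ex n) < pvUncovered U ex := by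
  have hfe : U.filter (fun x => !(PySem.Set.contains (PySem.Set.add ex n) x)) =
      (U.filter (fun x => !(PySem.Set.contains ex x))).filter (fun x => !(x == n)) := by
    rw [List.filter_filter]
    apply List.filter_congr
    intro a _
    rw [pvContains_add, Bool.not_or, Bool.and_comm]
  have hmem : n ∈ U.filter (fun x => !(PySem.Set.contains ex x)) :=
    List.mem_filter.mpr ⟨hn, by
      have hne : n ∉ ex := fun h => by
        have hc := (PySem.Set.contains_iff ex n).mpr h
        rw [hx] at hc
        cases hc
      simpa using hne⟩
  calc (U.filter (fun x => !(PySem.Set.contains (PySem.Set.add ex n) x))).length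
      = ((U.filter (fun x => !(PySem.Set.contains ex x))).filter (fun x => !(x == n))).length := by rw [hfe]
    _ < (U.filter (fun x => !(PySem.Set.contains ex x))).length :=
        List.length_filter_lt_length_iff_exists.mpr ⟨n, hmem, by simp⟩

theorem pvPush_measure (U : List String) (ns : List String) (st : PySem.Set String × List String)
    (h : ∀ n ∈ ns, n ∈ U) :
    2 * pvUncovered U (pvPush st ns).1 + (pvPush st ns).2.length ≤
      2 * pvUncovered U st.1 + st.2.length := by
  induction ns generalizing st with
  | nil => simp [pvPush]
  | cons n ns ih =>
    have hstep : pvPush st (n :: ns) =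
        pvPush (if !(PySem.Set.contains st.1 n) then (PySem.Set.add st.1 n, st.2 ++ [n]) else st) ns := by
      simp [pvPush]
    by_cases hc : PySem.Set.contains st.1 n = true
    · have hm : n ∈ st.1 := (PySem.Set.contains_iff _ _).mp hc
      rw [hstep, if_neg (by simp [hm])]
      exact ih st (fun m hm => h m (List.mem_cons_of_mem _ hm))
    · have hc' : PySem.Set.contains st.1 n = false := by
        cases hcc : PySem.Set.contains st.1 n
        · rfl
        · exact absurd hcc hc
      have hnm : n ∉ st.1 := fun hm => by
        have hcm := (PySem.Set.contains_iff st.1 n).mpr hm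
        rw [hc'] at hcm
        cases hcm
      rw [hstep, if_pos (by simp [hnm])]
      have hlt := pvUncovered_add_lt U st.1 n (h n List.mem_cons_self) hc'
      have hih := ih (PySem.Set.add st.1 n, st.2 ++ [n]) (fun m hm => h m (List.mem_cons_of_mem _ hm))
      simp only [List.length_append, List.length_cons, List.length_nil] at hih ⊢
      omega

theorem pvGetD_mem_univ (adj : PySem.Dict String (PySem.Set String)) (x y : String)
    (h : y ∈ PySem.Dict.getD adj x PySem.Set.empty) : y ∈ pvUniv adj := by
  rcases hg : PySem.Dict.get? adj x with _ | v
  · rw [PySem.Dict.getD_of_get?_eq_none adj PySem.Set.empty hg] at h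
    cases h
  · rw [PySem.Dict.getD_of_get?_eq_some adj PySem.Set.empty hg] at h
    have hv : v ∈ PySem.Dict.values adj := by
      have := PySem.Dict.mem_items_of_get?_eq_some adj hg
      simp only [PySem.Dict.values]
      exact List.mem_map.mpr ⟨(x, v), this, rfl⟩
    exact (PySem.Set.mem_ofList _ _).mpr (List.mem_flatten.mpr ⟨v, hv, h⟩)

-- 'while queue: current = queue.pop(0); for neighbor in adjacency.get(current, set()): …'
def pvBfs (adj : PySem.Dict String (PySem.Set String)) (ex : PySem.Set String) (queue : List String) : PySem.Set String :=
  match queue with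
  | [] => ex
  | current :: rest =>
      let st := pvPush (ex, rest) (PySem.Dict.getD adj current PySem.Set.empty)
      pvBfs adj st.1 st.2
termination_by 2 * pvUncovered (pvUniv adj) ex + queue.length
decreasing_by
  have h := pvPush_measure (pvUniv adj) (PySem.Dict.getD adj current PySem.Set.empty)
      (ex, rest) (fun n hn => pvGetD_mem_univ adj current n hn)
  dsimp only at h ⊢
  simp only [List.length_cons]
  omega

def handle_transitive_py (packages_in_sbom : List (List (String × String))) (depsToExclude : List String) (relationships : List (List (String × String))) : List (List (String × String)) :=
  let name_to_spdxids := packages_in_sbom.foldl pvNameStep PySem.Dict.empty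
  let adjacency := relationships.foldl pvAdjStep PySem.Dict.empty
  let init := depsToExclude.foldl
    (fun st dep_name => pvPush st (PySem.Dict.getD name_to_spdxids dep_name []))
    (PySem.Set.empty, [])
  let excluded_spdx_ids := pvBfs adjacency init.1 init.2
  packages_in_sbom.filter (fun pkg =>
    !(pvIn (pvGet pkg "SPDXID") excluded_spdx_ids) && !(pvIn (pvGet pkg "name") depsToExclude))

-- ===== PORT B =====
-- the DEPENDS_ON edge-pair comprehension
def pvEdges (relationships : List (List (String × String))) : List (String × String) :=
  relationships.filterMap (fun rel =>
    match rel.lookup "relationshipType", rel.lookup "spdxElementId", rel.lookup "relatedSpdxElement" with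
    | some t, some src, some dst =>
        if t = "DEPENDS_ON" ∧ src ≠ "" ∧ dst ≠ "" then some (src, dst) else none
    | _, _, _ => none)

-- the seed-set comprehension
def pvSeeds (packages_in_sbom : List (List (String × String))) (depsToExclude : List String) : List String :=
  packages_in_sbom.filterMap (fun pkg =>
    match pkg.lookup "name", pkg.lookup "SPDXID" with
    | some nm, some sid =>
        if nm ≠ "" ∧ sid ≠ "" ∧ nm ∈ depsToExclude then some sid else none
    | _, _ => none)

-- one round: excluded |= {dst for src, dst in edges if src in excluded}
def pvRound (edges : List (String × String)) (ex : PySem.Set String) : PySem.Set String :=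
  PySem.Set.update ex
    (PySem.Set.ofList (edges.filterMap (fun e =>
      if PySem.Set.contains ex e.1 then some e.2 else none)))

-- 'for _ in range(n): excluded = round(excluded)'
def pvRounds (edges : List (String × String)) : Nat → PySem.Set String → PySem.Set String
  | 0, ex => ex
  | Nat.succ n, ex => pvRounds edges n (pvRound edges ex)

def handle_transitive_py_alt (packages_in_sbom : List (List (String × String))) (depsToExclude : List String) (relationships : List (List (String × String))) : List (List (String × String)) :=
  let edges := pvEdges relationships
  let excluded := pvRounds edges edges.length (PySem.Set.ofList (pvSeeds packages_in_sbom depsToExclude))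
  packages_in_sbom.filter (fun pkg =>
    (match pkg.lookup "SPDXID" with
     | some s => !(PySem.Set.contains excluded s)
     | none => true)
    &&
    (match pkg.lookup "name" with
     | some n => !(depsToExclude.contains n)
     | none => true))

-- ===== PRECONDITION & SPEC =====
def Spec_handle_transitive_py (packages_in_sbom : List (List (String × String))) (depsToExclude : List String) (relationships : List (List (String × String))) (out : List (List (String × String))) : Prop := out = handle_transitive_py_alt packages_in_sbom depsToExclude relationships
instance (packages_in_sbom : List (List (String × String))) (depsToExclude : List String) (relationships : List (List (String × String))) (out : List (List (String × String))) : Decidable (Spec_handle_transitive_py packages_in_sbom depsToExclude relationships out) := by unfold Spec_handle_transitive_py; infer_instance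

-- ===== CLAIM (what is proved, stated in full; the proofs are below) =====
def Claim_equal_handle_transitive_py : Prop := ∀ (packages_in_sbom : List (List (String × String))) (depsToExclude : List String) (relationships : List (List (String × String))), Dom_handle_transitive_py packages_in_sbom depsToExclude relationships → Spec_handle_transitive_py packages_in_sbom depsToExclude relationships (handle_transitive_py packages_in_sbom depsToExclude relationships)

-- ===== LEMMAS AND PROOFS =====

-- reachability from the seed predicate through the edge predicate
inductive pvReach (seed : String → Prop) (edge : String → String → Prop) : String → Prop
  | base {x : String} : seed x → pvReach seed edge x
  | step {x y : String} : pvReach seed edge x → edge x y → pvReach seed edge y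

theorem pvReach_bind {s1 s2 : String → Prop} {e : String → String → Prop}
    (h : ∀ y, s2 y → pvReach s1 e y) {x : String} (hr : pvReach s2 e x) : pvReach s1 e x := by
  induction hr with
  | base hx => exact h _ hx
  | step _ he ih => exact pvReach.step ih he

theorem pvReach_congr {s1 s2 : String → Prop} {e1 e2 : String → String → Prop}
    (hs : ∀ x, s1 x ↔ s2 x) (he : ∀ x y, e1 x y ↔ e2 x y) (x : String) :
    pvReach s1 e1 x ↔ pvReach s2 e2 x := by
  constructor <;> intro hr
  · induction hr with
    | base hx => exact pvReach.base ((hs _).mp hx)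
    | step _ hxy ih => exact pvReach.step ih ((he _ _).mp hxy)
  · induction hr with
    | base hx => exact pvReach.base ((hs _).mpr hx)
    | step _ hxy ih => exact pvReach.step ih ((he _ _).mpr hxy)

theorem pvPush_cons (st : PySem.Set String × List String) (n : String) (ns : List String) :
    pvPush st (n :: ns) =
      pvPush (if !(PySem.Set.contains st.1 n) then (PySem.Set.add st.1 n, st.2 ++ [n]) else st) ns := by
  simp [pvPush]

theorem pvPush_fst_mem (ns : List String) (st : PySem.Set String × List String) (x : String) :
    x ∈ (pvPush st ns).1 ↔ x ∈ st.1 ∨ x ∈ ns := by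
  induction ns generalizing st with
  | nil => simp [pvPush]
  | cons n ns ih =>
    rw [pvPush_cons]
    by_cases hc : n ∈ st.1
    · rw [if_neg (by simp [hc])]
      rw [ih]
      simp only [List.mem_cons]
      constructor
      · rintro (h | h) <;> tauto
      · rintro (h | rfl | h) <;> tauto
    · rw [if_pos (by simp [hc])]
      rw [ih]
      simp only [PySem.Set.mem_add, List.mem_cons]
      tauto

theorem pvPush_snd_mem (ns : List String) (st : PySem.Set String × List String) (x : String) :
    x ∈ (pvPush st ns).2 ↔ x ∈ st.2 ∨ (x ∈ ns ∧ x ∉ st.1) := by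
  induction ns generalizing st with
  | nil => simp [pvPush]
  | cons n ns ih =>
    rw [pvPush_cons]
    by_cases hc : n ∈ st.1
    · rw [if_neg (by simp [hc])]
      rw [ih]
      simp only [List.mem_cons]
      constructor
      · rintro (h | h) <;> tauto
      · rintro (h | ⟨h1 | h1, h2⟩)
        · tauto
        · exact absurd (h1 ▸ hc) h2
        · tauto
    · rw [if_pos (by simp [hc])]
      rw [ih]
      simp only [PySem.Set.mem_add, List.mem_append, List.mem_cons]
      by_cases hx : x = n
      · subst hx
        simp [hc]
      · constructor
        · rintro (h | h)
          · tauto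
          · rcases h with ⟨h1, h2⟩
            refine Or.inr ⟨Or.inr h1, fun hm => h2 (Or.inl hm)⟩
        · rintro (h | ⟨h1 | h1, h2⟩)
          · tauto
          · exact absurd h1 hx
          · exact Or.inr ⟨h1, fun hm => by rcases hm with hm | hm; exact h2 hm; exact hx hm⟩

theorem pvBfs_mem (adj : PySem.Dict String (PySem.Set String)) (seed : String → Prop) :
    ∀ (ex : PySem.Set String) (q : List String),
    (∀ x ∈ ex, pvReach seed (fun a b => b ∈ PySem.Dict.getD adj a PySem.Set.empty) x) →
    (∀ x ∈ q, x ∈ ex) →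
    (∀ x ∈ ex, x ∉ q → ∀ y ∈ PySem.Dict.getD adj x PySem.Set.empty, y ∈ ex) →
    (∀ x, seed x → x ∈ ex) →
    ∀ x, x ∈ pvBfs adj ex q ↔ pvReach seed (fun a b => b ∈ PySem.Dict.getD adj a PySem.Set.empty) x := by
  intro ex q
  induction ex, q using pvBfs.induct adj with
  | case1 ex =>
    intro ha _ hc hd x
    rw [pvBfs]
    constructor
    · exact ha x
    · intro hr
      induction hr with
      | base h => exact hd _ h
      | step _ he ih => exact hc _ ih (fun h => List.not_mem_nil h) _ he
  | case2 ex current rest st ih =>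
    intro ha hb hc hd x
    rw [pvBfs]
    have hcur : current ∈ ex := hb current List.mem_cons_self
    have hRcur := ha current hcur
    have Pf := fun z => pvPush_fst_mem (PySem.Dict.getD adj current PySem.Set.empty) (ex, rest) z
    have Ps := fun z => pvPush_snd_mem (PySem.Dict.getD adj current PySem.Set.empty) (ex, rest) z
    apply ih
    · intro z hz
      rcases (Pf z).mp hz with h | h
      · exact ha z h
      · exact pvReach.step hRcur h
    · intro z hz
      rcases (Ps z).mp hz with h | ⟨h1, _⟩
      · exact (Pf z).mpr (Or.inl (hb z (List.mem_cons_of_mem _ h)))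
      · exact (Pf z).mpr (Or.inr h1)
    · intro z hz hnq y hy
      rcases (Pf z).mp hz with hex | hns
      · by_cases hq : z ∈ current :: rest
        · rcases List.mem_cons.mp hq with rfl | hr'
          · exact (Pf y).mpr (Or.inr hy)
          · exact absurd ((Ps z).mpr (Or.inl hr')) hnq
        · exact (Pf y).mpr (Or.inl (hc z hex hq y hy))
      · by_cases hex : z ∈ ex
        · by_cases hq : z ∈ current :: rest
          · rcases List.mem_cons.mp hq with rfl | hr'
            · exact (Pf y).mpr (Or.inr hy)
            · exact absurd ((Ps z).mpr (Or.inl hr')) hnq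
          · exact (Pf y).mpr (Or.inl (hc z hex hq y hy))
        · exact absurd ((Ps z).mpr (Or.inr ⟨hns, hex⟩)) hnq
    · intro z hz
      exact (Pf z).mpr (Or.inl (hd z hz))

-- ---- B-side lemmas: the round-based closure computes reachability ----

theorem pvRound_mem (edges : List (String × String)) (ex : PySem.Set String) (x : String) :
    x ∈ pvRound edges ex ↔ x ∈ ex ∨ ∃ e ∈ edges, e.1 ∈ ex ∧ e.2 = x := by
  unfold pvRound
  rw [PySem.Set.mem_update, PySem.Set.mem_ofList, List.mem_filterMap]
  constructor
  · rintro (h | ⟨e, he, hf⟩)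
    · exact Or.inl h
    · by_cases hc : PySem.Set.contains ex e.1 = true
      · rw [if_pos hc] at hf
        exact Or.inr ⟨e, he, (PySem.Set.contains_iff _ _).mp hc, Option.some.inj hf⟩
      · rw [if_neg hc] at hf
        cases hf
  · rintro (h | ⟨e, he, h1, h2⟩)
    · exact Or.inl h
    · refine Or.inr ⟨e, he, ?_⟩
      rw [if_pos ((PySem.Set.contains_iff _ _).mpr h1), h2]

theorem pvRound_congr (edges : List (String × String)) (ex1 ex2 : PySem.Set String)
    (h : ∀ x, x ∈ ex1 ↔ x ∈ ex2) (x : String) :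
    x ∈ pvRound edges ex1 ↔ x ∈ pvRound edges ex2 := by
  rw [pvRound_mem, pvRound_mem]
  constructor
  · rintro (hx | ⟨e, he, h1, h2⟩)
    · exact Or.inl ((h x).mp hx)
    · exact Or.inr ⟨e, he, (h e.1).mp h1, h2⟩
  · rintro (hx | ⟨e, he, h1, h2⟩)
    · exact Or.inl ((h x).mpr hx)
    · exact Or.inr ⟨e, he, (h e.1).mpr h1, h2⟩

theorem pvRounds_congr (edges : List (String × String)) (n : Nat) :
    ∀ (ex1 ex2 : PySem.Set String), (∀ x, x ∈ ex1 ↔ x ∈ ex2) →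
    ∀ x, x ∈ pvRounds edges n ex1 ↔ x ∈ pvRounds edges n ex2 := by
  induction n with
  | zero => exact fun ex1 ex2 h => h
  | succ n ih =>
    intro ex1 ex2 h x
    exact ih _ _ (pvRound_congr edges ex1 ex2 h) x

theorem pvRounds_of_fix (edges : List (String × String)) (ex : PySem.Set String)
    (h : ∀ x, x ∈ pvRound edges ex ↔ x ∈ ex) (n : Nat) :
    ∀ x, x ∈ pvRounds edges n ex ↔ x ∈ ex := by
  induction n with
  | zero => exact fun _ => Iff.rfl
  | succ n ih =>
    intro x
    show x ∈ pvRounds edges n (pvRound edges ex) ↔ x ∈ ex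
    rw [pvRounds_congr edges n _ _ h x]
    exact ih x

theorem pvUncovered_mono (U : List String) (S T : PySem.Set String)
    (h : ∀ x, x ∈ S → x ∈ T) : pvUncovered U T ≤ pvUncovered U S := by
  unfold pvUncovered
  rw [← List.countP_eq_length_filter, ← List.countP_eq_length_filter]
  apply List.countP_mono_left
  intro a _ ha
  simp only [Bool.not_eq_true'] at ha ⊢
  cases hc : PySem.Set.contains S a
  · rfl
  · exfalso
    have hm := (PySem.Set.contains_iff T a).mpr (h a ((PySem.Set.contains_iff S a).mp hc))
    rw [ha] at hm
    exact Bool.false_ne_true hm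

theorem pvRounds_fix (edges : List (String × String)) :
    ∀ (n : Nat) (ex : PySem.Set String),
    pvUncovered (edges.map (·.2)) ex ≤ n →
    ∀ x, x ∈ pvRound edges (pvRounds edges n ex) ↔ x ∈ pvRounds edges n ex := by
  intro n
  induction n with
  | zero =>
    intro ex hm x
    show x ∈ pvRound edges ex ↔ x ∈ ex
    constructor
    · intro hx
      rcases (pvRound_mem edges ex x).mp hx with h | ⟨e, he, h1, h2⟩
      · exact h
      · by_cases hc : PySem.Set.contains ex x = true
        · exact (PySem.Set.contains_iff _ _).mp hc
        · exfalso
          have hu : x ∈ (edges.map (·.2)).filter (fun y => !(PySem.Set.contains ex y)) :=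
            List.mem_filter.mpr ⟨List.mem_map.mpr ⟨e, he, h2⟩, by
              cases hcc : PySem.Set.contains ex x
              · rfl
              · exact absurd hcc hc⟩
          have : 0 < pvUncovered (edges.map (·.2)) ex :=
            List.length_pos_iff.mpr (List.ne_nil_of_mem hu)
          omega
    · exact fun hx => (pvRound_mem edges ex x).mpr (Or.inl hx)
  | succ n ih =>
    intro ex hm
    by_cases hfix : ∀ x, x ∈ pvRound edges ex ↔ x ∈ ex
    · intro x
      have h1 : ∀ y, y ∈ pvRounds edges (n + 1) ex ↔ y ∈ ex :=
        pvRounds_of_fix edges ex hfix (n + 1)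
      rw [pvRound_congr edges _ ex h1 x, hfix x, h1 x]
    · rw [not_forall] at hfix
      obtain ⟨y, hy⟩ := hfix
      have hyin : y ∈ pvRound edges ex ∧ y ∉ ex := by
        by_cases h1 : y ∈ pvRound edges ex
        · exact ⟨h1, fun h2 => hy ⟨fun _ => h2, fun _ => h1⟩⟩
        · exact absurd (Iff.intro (fun h2 => absurd h2 h1)
            (fun h2 => (pvRound_mem edges ex y).mpr (Or.inl h2))) hy
      obtain ⟨hy1, hy2⟩ := hyin
      have hyU : y ∈ edges.map (·.2) := by
        rcases (pvRound_mem edges ex y).mp hy1 with h | ⟨e, he, _, h2⟩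
        · exact absurd h hy2
        · exact List.mem_map.mpr ⟨e, he, h2⟩
      have hyc : PySem.Set.contains ex y = false := by
        cases hc : PySem.Set.contains ex y
        · rfl
        · exact absurd ((PySem.Set.contains_iff _ _).mp hc) hy2
      have hlt := pvUncovered_add_lt (edges.map (·.2)) ex y hyU hyc
      have hsub : ∀ x, x ∈ PySem.Set.add ex y → x ∈ pvRound edges ex := by
        intro x hx
        rcases (PySem.Set.mem_add _ _ _).mp hx with hx | rfl
        · exact (pvRound_mem edges ex x).mpr (Or.inl hx)
        · exact hy1
      have hle := pvUncovered_mono (edges.map (·.2)) (PySem.Set.add ex y) (pvRound edges ex) hsub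
      exact ih (pvRound edges ex) (by omega)

theorem pvRounds_sound (edges : List (String × String)) :
    ∀ (n : Nat) (ex : PySem.Set String) (x : String),
    x ∈ pvRounds edges n ex → pvReach (· ∈ ex) (fun a b => (a, b) ∈ edges) x := by
  intro n
  induction n with
  | zero => exact fun ex x hx => pvReach.base hx
  | succ n ih =>
    intro ex x hx
    have hr := ih (pvRound edges ex) x hx
    refine pvReach_bind ?_ hr
    intro z hz
    rcases (pvRound_mem edges ex z).mp hz with h | ⟨e, he, h1, h2⟩
    · exact pvReach.base h
    · exact h2 ▸ pvReach.step (pvReach.base h1) (by exact he)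

theorem pvRounds_grow (edges : List (String × String)) :
    ∀ (n : Nat) (ex : PySem.Set String) (x : String), x ∈ ex → x ∈ pvRounds edges n ex := by
  intro n
  induction n with
  | zero => exact fun _ _ h => h
  | succ n ih =>
    intro ex x hx
    exact ih (pvRound edges ex) x ((pvRound_mem edges ex x).mpr (Or.inl hx))

theorem pvRounds_mem (edges : List (String × String)) (ex : PySem.Set String) (x : String) :
    x ∈ pvRounds edges edges.length ex ↔ pvReach (· ∈ ex) (fun a b => (a, b) ∈ edges) x := by
  constructor
  · exact pvRounds_sound edges edges.length ex x
  · intro hr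
    induction hr with
    | base h => exact pvRounds_grow edges edges.length ex _ h
    | step _ he ih =>
      rename_i a b _
      have hm : pvUncovered (edges.map (·.2)) ex ≤ edges.length := by
        have h1 : pvUncovered (edges.map (·.2)) ex ≤ (edges.map (·.2)).length :=
          List.length_filter_le _ _
        simpa using h1
      have hfix := pvRounds_fix edges edges.length ex hm
      exact (hfix b).mp ((pvRound_mem edges _ b).mpr
        (Or.inr ⟨(a, b), he, ih, rfl⟩))

-- ---- glue: A's maps/BFS and B's edge list/seed list describe the same graph ----

theorem pvMem_buildNames_aux (pkgs : List (List (String × String))) (nm sid : String) :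
    ∀ d : PySem.Dict String (List String),
    sid ∈ PySem.Dict.getD (pkgs.foldl pvNameStep d) nm [] ↔
      sid ∈ PySem.Dict.getD d nm [] ∨
        ∃ pkg ∈ pkgs, pvGet pkg "name" = some nm ∧ pvGet pkg "SPDXID" = some sid ∧ nm ≠ "" ∧ sid ≠ "" := by
  induction pkgs with
  | nil => simp
  | cons p ps ih =>
    intro d
    rw [List.foldl_cons, ih]
    have hstep : sid ∈ PySem.Dict.getD (pvNameStep d p) nm [] ↔
        sid ∈ PySem.Dict.getD d nm [] ∨
          (pvGet p "name" = some nm ∧ pvGet p "SPDXID" = some sid ∧ nm ≠ "" ∧ sid ≠ "") := by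
      unfold pvNameStep
      rcases hn : pvGet p "name" with _ | n
      · simp
      rcases hs : pvGet p "SPDXID" with _ | s
      · simp
      dsimp only
      by_cases hz : n = "" ∨ s = ""
      · rw [if_pos hz]
        simp only [Option.some.injEq]
        constructor
        · exact Or.inl
        · rintro (h | ⟨rfl, rfl, hne, hse⟩)
          · exact h
          · rcases hz with rfl | rfl
            · exact absurd rfl hne
            · exact absurd rfl hse
      · rw [if_neg hz]
        rw [not_or] at hz
        rw [PySem.Dict.getD_modify]
        by_cases he : nm = n
        · subst he
          rw [if_pos rfl]
          constructor
          · intro hmem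
            rcases List.mem_append.mp hmem with h | h
            · exact Or.inl h
            · have hss : sid = s := List.mem_singleton.mp h
              subst hss
              exact Or.inr ⟨rfl, rfl, hz.1, hz.2⟩
          · rintro (h | ⟨_, hss, _, _⟩)
            · exact List.mem_append.mpr (Or.inl h)
            · have : s = sid := Option.some.inj hss
              subst this
              exact List.mem_append.mpr (Or.inr (List.mem_singleton.mpr rfl))
        · rw [if_neg he]
          simp only [Option.some.injEq]
          constructor
          · exact Or.inl
          · rintro (h | ⟨rfl, _, _, _⟩)
            · exact h
            · exact absurd rfl he
    rw [hstep]
    constructor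
    · rintro ((h | h) | ⟨pkg, hm, hcond⟩)
      · exact Or.inl h
      · exact Or.inr ⟨p, List.mem_cons_self, h⟩
      · exact Or.inr ⟨pkg, List.mem_cons_of_mem _ hm, hcond⟩
    · rintro (h | ⟨pkg, hm, hcond⟩)
      · exact Or.inl (Or.inl h)
      · rcases List.mem_cons.mp hm with rfl | hm'
        · exact Or.inl (Or.inr hcond)
        · exact Or.inr ⟨pkg, hm', hcond⟩

theorem pvMem_buildNames (pkgs : List (List (String × String))) (nm sid : String) :
    sid ∈ PySem.Dict.getD (pkgs.foldl pvNameStep PySem.Dict.empty) nm [] ↔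
      ∃ pkg ∈ pkgs, pvGet pkg "name" = some nm ∧ pvGet pkg "SPDXID" = some sid ∧ nm ≠ "" ∧ sid ≠ "" := by
  rw [pvMem_buildNames_aux]
  simp [PySem.Dict.getD_empty]

def pvEdgeCond (rel : List (String × String)) (x y : String) : Prop :=
  pvGet rel "relationshipType" = some "DEPENDS_ON" ∧ pvGet rel "spdxElementId" = some x ∧
    pvGet rel "relatedSpdxElement" = some y ∧ x ≠ "" ∧ y ≠ ""

theorem pvAdjStep_mem (d : PySem.Dict String (PySem.Set String)) (rel : List (String × String)) (x y : String) :
    y ∈ PySem.Dict.getD (pvAdjStep d rel) x PySem.Set.empty ↔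
      y ∈ PySem.Dict.getD d x PySem.Set.empty ∨ pvEdgeCond rel x y := by
  unfold pvAdjStep pvEdgeCond
  by_cases ht : pvGet rel "relationshipType" = some "DEPENDS_ON"
  · rw [if_neg (by simpa using ht)]
    rcases hsrc : pvGet rel "spdxElementId" with _ | src
    · simp [ht]
    rcases hdst : pvGet rel "relatedSpdxElement" with _ | dst
    · simp [ht]
    dsimp only
    by_cases hz : src = "" ∨ dst = ""
    · rw [if_pos hz]
      simp only [ht, Option.some.injEq]
      constructor
      · exact Or.inl
      · rintro (h | ⟨_, rfl, rfl, hne, hse⟩)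
        · exact h
        · rcases hz with rfl | rfl
          · exact absurd rfl hne
          · exact absurd rfl hse
    · rw [if_neg hz]
      rw [not_or] at hz
      rw [PySem.Dict.getD_modify]
      by_cases he : x = src
      · subst he
        rw [if_pos rfl]
        rw [PySem.Set.mem_add]
        constructor
        · rintro (h | rfl)
          · exact Or.inl h
          · exact Or.inr ⟨ht, rfl, rfl, hz.1, hz.2⟩
        · rintro (h | ⟨_, _, hdd, _, _⟩)
          · exact Or.inl h
          · exact Or.inr (Option.some.inj hdd).symm
      · rw [if_neg he]
        constructor
        · exact Or.inl
        · rintro (h | ⟨_, hss, _, _, _⟩)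
          · exact h
          · exact absurd (Option.some.inj hss).symm he
  · rw [if_pos (by simpa using ht)]
    constructor
    · exact Or.inl
    · rintro (h | ⟨htt, _⟩)
      · exact h
      · exact absurd htt ht

theorem pvMem_buildAdj_aux (rels : List (List (String × String))) (x y : String) :
    ∀ d : PySem.Dict String (PySem.Set String),
    y ∈ PySem.Dict.getD (rels.foldl pvAdjStep d) x PySem.Set.empty ↔
      y ∈ PySem.Dict.getD d x PySem.Set.empty ∨ ∃ rel ∈ rels, pvEdgeCond rel x y := by
  induction rels with
  | nil => simp
  | cons r rs ih =>
    intro d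
    rw [List.foldl_cons, ih, pvAdjStep_mem]
    constructor
    · rintro ((h | h) | ⟨rel, hm, hc⟩)
      · exact Or.inl h
      · exact Or.inr ⟨r, List.mem_cons_self, h⟩
      · exact Or.inr ⟨rel, List.mem_cons_of_mem _ hm, hc⟩
    · rintro (h | ⟨rel, hm, hc⟩)
      · exact Or.inl (Or.inl h)
      · rcases List.mem_cons.mp hm with rfl | hm'
        · exact Or.inl (Or.inr hc)
        · exact Or.inr ⟨rel, hm', hc⟩

theorem pvMem_edges (rels : List (List (String × String))) (x y : String) :
    (x, y) ∈ pvEdges rels ↔ ∃ rel ∈ rels, pvEdgeCond rel x y := by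
  unfold pvEdges
  rw [List.mem_filterMap]
  constructor
  · rintro ⟨rel, hm, hf⟩
    refine ⟨rel, hm, ?_⟩
    unfold pvEdgeCond pvGet
    rcases ht : rel.lookup "relationshipType" with _ | t <;> rw [ht] at hf
    · cases hf
    rcases hsrc : rel.lookup "spdxElementId" with _ | src <;> rw [hsrc] at hf
    · cases hf
    rcases hdst : rel.lookup "relatedSpdxElement" with _ | dst <;> rw [hdst] at hf
    · cases hf
    dsimp only at hf
    by_cases hcond : t = "DEPENDS_ON" ∧ src ≠ "" ∧ dst ≠ ""
    · rw [if_pos hcond] at hf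
      have hx : src = x := congrArg Prod.fst (Option.some.inj hf)
      have hy : dst = y := congrArg Prod.snd (Option.some.inj hf)
      subst hx hy
      exact ⟨by rw [hcond.1], rfl, rfl, hcond.2.1, hcond.2.2⟩
    · rw [if_neg hcond] at hf
      cases hf
  · rintro ⟨rel, hm, ht, hsrc, hsd, hxne, hyne⟩
    refine ⟨rel, hm, ?_⟩
    unfold pvGet at ht hsrc hsd
    rw [ht, hsrc, hsd]
    dsimp only
    rw [if_pos ⟨rfl, hxne, hyne⟩]

theorem pvMem_buildAdj (rels : List (List (String × String))) (x y : String) :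
    y ∈ PySem.Dict.getD (rels.foldl pvAdjStep PySem.Dict.empty) x PySem.Set.empty ↔
      (x, y) ∈ pvEdges rels := by
  rw [pvMem_buildAdj_aux, pvMem_edges, PySem.Dict.getD_empty]
  simp

theorem pvMem_seeds (pkgs : List (List (String × String))) (deps : List String) (x : String) :
    x ∈ pvSeeds pkgs deps ↔ ∃ dep ∈ deps, ∃ pkg ∈ pkgs,
      pvGet pkg "name" = some dep ∧ pvGet pkg "SPDXID" = some x ∧ dep ≠ "" ∧ x ≠ "" := by
  unfold pvSeeds
  rw [List.mem_filterMap]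
  constructor
  · rintro ⟨pkg, hm, hf⟩
    rcases hn : pkg.lookup "name" with _ | n <;> rw [hn] at hf
    · cases hf
    rcases hs : pkg.lookup "SPDXID" with _ | s <;> rw [hs] at hf
    · cases hf
    dsimp only at hf
    by_cases hcond : n ≠ "" ∧ s ≠ "" ∧ n ∈ deps
    · rw [if_pos hcond] at hf
      have hx : s = x := Option.some.inj hf
      subst hx
      exact ⟨n, hcond.2.2, pkg, hm, hn, hs, hcond.1, hcond.2.1⟩
    · rw [if_neg hcond] at hf
      cases hf
  · rintro ⟨dep, hdep, pkg, hm, hn, hs, hne, hxe⟩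
    refine ⟨pkg, hm, ?_⟩
    unfold pvGet at hn hs
    rw [hn, hs]
    dsimp only
    rw [if_pos ⟨hne, hxe, hdep⟩]

theorem pvInit_fst_aux (M : PySem.Dict String (List String)) (deps : List String) :
    ∀ (st : PySem.Set String × List String) (x : String),
    x ∈ (deps.foldl (fun st dep => pvPush st (PySem.Dict.getD M dep [])) st).1 ↔
      x ∈ st.1 ∨ ∃ dep ∈ deps, x ∈ PySem.Dict.getD M dep [] := by
  induction deps with
  | nil => simp
  | cons dep deps ih =>
    intro st x
    rw [List.foldl_cons, ih, pvPush_fst_mem]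
    constructor
    · rintro ((h | h) | ⟨d', hd', hm⟩)
      · exact Or.inl h
      · exact Or.inr ⟨dep, List.mem_cons_self, h⟩
      · exact Or.inr ⟨d', List.mem_cons_of_mem _ hd', hm⟩
    · rintro (h | ⟨d', hd', hm⟩)
      · exact Or.inl (Or.inl h)
      · rcases List.mem_cons.mp hd' with rfl | hd''
        · exact Or.inl (Or.inr hm)
        · exact Or.inr ⟨d', hd'', hm⟩

theorem pvInit_eq_aux (M : PySem.Dict String (List String)) (deps : List String) :
    ∀ (st : PySem.Set String × List String), (∀ x, x ∈ st.1 ↔ x ∈ st.2) →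
    ∀ x, x ∈ (deps.foldl (fun st dep => pvPush st (PySem.Dict.getD M dep [])) st).1 ↔
      x ∈ (deps.foldl (fun st dep => pvPush st (PySem.Dict.getD M dep [])) st).2 := by
  induction deps with
  | nil => exact fun st h => h
  | cons dep deps ih =>
    intro st h x
    rw [List.foldl_cons]
    apply ih
    intro z
    rw [pvPush_fst_mem, pvPush_snd_mem]
    have hz := h z
    by_cases hm : z ∈ st.1 <;> tauto

theorem pvExcluded_iff (pkgs : List (List (String × String))) (deps : List String) (rels : List (List (String × String))) :
    ∀ s : String,
    s ∈ pvBfs (rels.foldl pvAdjStep PySem.Dict.empty)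
        (deps.foldl (fun st dep => pvPush st (PySem.Dict.getD (pkgs.foldl pvNameStep PySem.Dict.empty) dep [])) (PySem.Set.empty, [])).1
        (deps.foldl (fun st dep => pvPush st (PySem.Dict.getD (pkgs.foldl pvNameStep PySem.Dict.empty) dep [])) (PySem.Set.empty, [])).2 ↔
      s ∈ pvRounds (pvEdges rels) (pvEdges rels).length (PySem.Set.ofList (pvSeeds pkgs deps)) := by
  intro s
  have hseed : ∀ x, x ∈ (deps.foldl (fun st dep => pvPush st (PySem.Dict.getD (pkgs.foldl pvNameStep PySem.Dict.empty) dep [])) (PySem.Set.empty, [])).1 ↔ x ∈ pvSeeds pkgs deps := by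
    intro x
    rw [pvInit_fst_aux, pvMem_seeds]
    constructor
    · rintro (h | ⟨dep, hdep, hm⟩)
      · cases h
      · rcases (pvMem_buildNames pkgs dep x).mp hm with ⟨pkg, hpkg, hn, hs, hne, hxe⟩
        exact ⟨dep, hdep, pkg, hpkg, hn, hs, hne, hxe⟩
    · rintro ⟨dep, hdep, pkg, hpkg, hn, hs, hne, hxe⟩
      exact Or.inr ⟨dep, hdep, (pvMem_buildNames pkgs dep x).mpr ⟨pkg, hpkg, hn, hs, hne, hxe⟩⟩
  have h12 := pvInit_eq_aux (pkgs.foldl pvNameStep PySem.Dict.empty) deps (PySem.Set.empty, []) (by simp [PySem.Set.empty])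
  have hA := pvBfs_mem (rels.foldl pvAdjStep PySem.Dict.empty) (· ∈ pvSeeds pkgs deps) _ _
    (fun x hx => pvReach.base ((hseed x).mp hx))
    (fun x hx => (h12 x).mpr hx)
    (fun x hx hnq => absurd ((h12 x).mp hx) hnq)
    (fun x hx => (hseed x).mpr hx)
  rw [hA s, pvRounds_mem (pvEdges rels) (PySem.Set.ofList (pvSeeds pkgs deps)) s]
  rw [pvReach_congr (fun _ => Iff.rfl) (fun a b => pvMem_buildAdj rels a b) s]
  exact pvReach_congr (fun x => (PySem.Set.mem_ofList (pvSeeds pkgs deps) x).symm) (fun _ _ => Iff.rfl) s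

theorem pvFilter_eq (pkg : List (String × String)) (deps : List String)
    (exA exB : PySem.Set String) (h : ∀ v, v ∈ exA ↔ v ∈ exB) :
    (!(pvIn (pvGet pkg "SPDXID") exA) && !(pvIn (pvGet pkg "name") deps)) =
      ((match pkg.lookup "SPDXID" with
        | some s => !(PySem.Set.contains exB s)
        | none => true)
       &&
       (match pkg.lookup "name" with
        | some n => !(deps.contains n)
        | none => true)) := by
  unfold pvIn pvGet
  have h1 : ∀ v, PySem.Set.contains exA v = PySem.Set.contains exB v := by
    intro v
    rw [Bool.eq_iff_iff, PySem.Set.contains_iff, PySem.Set.contains_iff]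
    exact h v
  rcases pkg.lookup "SPDXID" with _ | s <;> rcases pkg.lookup "name" with _ | n <;>
    simp [PySem.Set.contains_eq_listContains] at h1 ⊢ <;> simp [h1]

-- ===== VERDICT (by name: the statement is the Claim_ definition above) =====
theorem handle_transitive_py_spec : Claim_equal_handle_transitive_py := by
  intro pkgs deps rels _
  show handle_transitive_py pkgs deps rels = handle_transitive_py_alt pkgs deps rels
  unfold handle_transitive_py handle_transitive_py_alt
  apply List.filter_congr
  intro pkg _
  exact pvFilter_eq pkg deps _ _ (pvExcluded_iff pkgs deps rels)
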